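-- pv_equiv track=rewrite | github.com/therbert448/Advent-of-Code | 2019/Day16.py | sum_els
-- ===== SOURCE A (Python) =====
-- def sum_els(els):
--     newels = []
--     total = 0
--     for i in range(len(els)):
--         total += els[-(i+1)]
--         newels.append(abs(total) % 10)
--     newels = newels[::-1]
--     return newels
-- ===== SOURCE B (Python) =====
-- def sum_els(els):
--     total = sum(els)
--     newels = []
--     for x in els:
--         newels.append(abs(total) % 10)
--         total -= x
--     return newels
-- ===== Notes on version B (the rewrite author's own statement) =====
-- stated objective: simpler
-- what changed: B computes the full sum once, then walks the list forward keeping a shrinking suffix-sum (subtracting each element after emitting abs(total)%10), so the backward negative-index accumulation and the final reversal disappear.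
import Mathlib
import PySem

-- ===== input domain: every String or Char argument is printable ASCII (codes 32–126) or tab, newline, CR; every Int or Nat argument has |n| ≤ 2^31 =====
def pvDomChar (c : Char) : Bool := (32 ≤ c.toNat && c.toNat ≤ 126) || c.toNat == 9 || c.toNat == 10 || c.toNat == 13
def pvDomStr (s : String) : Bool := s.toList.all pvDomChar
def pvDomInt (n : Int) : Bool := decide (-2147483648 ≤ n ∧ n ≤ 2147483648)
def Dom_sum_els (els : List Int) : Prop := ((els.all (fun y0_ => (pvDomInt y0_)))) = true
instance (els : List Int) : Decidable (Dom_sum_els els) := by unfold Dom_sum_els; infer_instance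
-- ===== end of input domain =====

-- B replaces A's backward negative-index accumulation + final reversal by one forward
-- pass with a shrinking suffix-sum (objective: simpler).


-- ===== PORT A =====
-- for i in range(len(els)): total += els[-(i+1)]; newels.append(abs(total) % 10); then newels[::-1].
-- els[-(i+1)] is always in range inside the loop, so pyGetD is exact here.
-- abs(total) % 10: |total| ≥ 0, so Lean's % equals Python's %.
def sum_els (els : List Int) : List Int :=
  let st := (PySem.List.pyRange 0 els.length 1).foldl
    (fun (st : List Int × Int) i =>
      let total := st.2 + PySem.List.pyGetD els (-(i + 1)) 0
      (st.1 ++ [|total| % 10], total)) ([], 0)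
  st.1.reverse  -- newels[::-1]; PySem.List.slice?_none_none_neg_one : xs[::-1] = reverse

-- ===== PORT B =====
def sum_els_alt (els : List Int) : List Int :=
  (els.foldl
    (fun (st : List Int × Int) x => (st.1 ++ [|st.2| % 10], st.2 - x))
    ([], els.sum)).1

-- ===== PRECONDITION & SPEC =====
def Spec_sum_els (els : List Int) (out : List Int) : Prop := out = sum_els_alt els
instance (els : List Int) (out : List Int) : Decidable (Spec_sum_els els out) := by unfold Spec_sum_els; infer_instance

-- ===== CLAIM (what is proved, stated in full; the proofs are below) =====
def Claim_equal_sum_els : Prop := ∀ (els : List Int), Dom_sum_els els → Spec_sum_els els (sum_els els)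

-- ===== LEMMAS AND PROOFS =====

-- the values A's backward loop produces, as a forward pass over the reversed list
def prefVals (ys : List Int) (t : Int) : List Int :=
  match ys with
  | [] => []
  | y :: ys => |t + y| % 10 :: prefVals ys (t + y)

-- the values B's loop produces
def sufVals (xs : List Int) (t : Int) : List Int :=
  match xs with
  | [] => []
  | x :: xs => |t| % 10 :: sufVals xs (t - x)

theorem foldlA_eq (ys : List Int) (acc : List Int) (t : Int) :
    (ys.foldl (fun (st : List Int × Int) x => (st.1 ++ [|st.2 + x| % 10], st.2 + x)) (acc, t))
      = (acc ++ prefVals ys t, t + ys.sum) := by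
  induction ys generalizing acc t with
  | nil => simp [prefVals]
  | cons y ys ih => simp [prefVals, ih, add_assoc]

theorem foldlB_eq (xs : List Int) (acc : List Int) (t : Int) :
    (xs.foldl (fun (st : List Int × Int) x => (st.1 ++ [|st.2| % 10], st.2 - x)) (acc, t)).1
      = acc ++ sufVals xs t := by
  induction xs generalizing acc t with
  | nil => simp [sufVals]
  | cons x xs ih => simp [sufVals, ih]

theorem prefVals_append (ys zs : List Int) (t : Int) :
    prefVals (ys ++ zs) t = prefVals ys t ++ prefVals zs (t + ys.sum) := by
  induction ys generalizing t with
  | nil => simp [prefVals]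
  | cons y ys ih => simp [prefVals, ih, add_assoc]

theorem prefVals_reverse (xs : List Int) (t : Int) :
    (prefVals xs.reverse t).reverse = sufVals xs (t + xs.sum) := by
  induction xs generalizing t with
  | nil => simp [prefVals, sufVals]
  | cons x xs ih =>
    simp only [List.reverse_cons, prefVals_append, prefVals, List.sum_cons,
      List.reverse_append, List.reverse_cons, List.reverse_nil, List.nil_append,
      List.cons_append, sufVals, ih, List.sum_reverse]
    rw [show t + (x + xs.sum) - x = t + xs.sum by ring,
      show t + (x + xs.sum) = t + xs.sum + x by ring]

-- the negative index els[-(i+1)] for i ∈ range(len) reads els.reverse at i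
theorem pyGetD_neg_eq_reverse (els : List Int) (i : Int) (h0 : 0 ≤ i)
    (h1 : i < (els.length : Int)) :
    PySem.List.pyGetD els (-(i + 1)) 0 = PySem.List.pyGetD els.reverse i 0 := by
  rw [PySem.List.pyGetD_eq_getElem els.reverse 0 h0 (by simpa using h1),
    show -(i + 1) = -(((i.toNat + 1 : Nat) : Int)) by omega,
    PySem.List.pyGetD_neg_natCast els (i.toNat + 1) 0 (by omega) (by omega)]
  simp [List.getElem_reverse, show els.length - (i.toNat + 1) = els.length - 1 - i.toNat by omega]

-- ===== VERDICT (by name: the statement is the Claim_ definition above) =====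
theorem sum_els_spec : Claim_equal_sum_els := by
  intro els _
  unfold Spec_sum_els sum_els sum_els_alt
  have hc : (PySem.List.pyRange 0 els.length 1).foldl
      (fun (st : List Int × Int) i =>
        (st.1 ++ [|st.2 + PySem.List.pyGetD els (-(i + 1)) 0| % 10],
          st.2 + PySem.List.pyGetD els (-(i + 1)) 0)) ([], 0)
    = (PySem.List.pyRange 0 els.length 1).foldl
      (fun (st : List Int × Int) i =>
        (st.1 ++ [|st.2 + PySem.List.pyGetD els.reverse i 0| % 10],
          st.2 + PySem.List.pyGetD els.reverse i 0)) ([], 0) := by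
    apply PySem.List.foldl_congr_mem
    intro st i hi
    have := (PySem.List.mem_pyRange_one).1 hi
    rw [pyGetD_neg_eq_reverse els i this.1 this.2]
  simp only [hc]
  rw [show (els.length : Int) = (els.reverse.length : Int) by simp,
    PySem.List.foldl_pyRange_zero_pyGetD' els.reverse 0
      (fun (st : List Int × Int) x => (st.1 ++ [|st.2 + x| % 10], st.2 + x)) ([], 0),
    foldlA_eq, foldlB_eq]
  simpa using prefVals_reverse els 0
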